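-- pv_equiv track=rewrite | github.com/huan186/LeetCode | 1806-minimum-number-of-operations-to-reinitialize-a-permutation/1806-minimum-number-of-operations-to-reinitialize-a-permutation.py | reinitializePermutation
-- ===== SOURCE A (Python) =====
-- def reinitializePermutation(n: int) -> int:
--     mapping = {i: i // 2 + (n // 2 if i % 2 else 0) for i in range(n)}
--     ops = 1
--     i = mapping[1]
--     while i != 1:
--         i = mapping[i]
--         ops += 1
--     return ops
-- ===== SOURCE B (Python) =====
-- def reinitializePermutation(n: int) -> int:
--     # The reverse step sends index i to 2*i mod m (m = n-1 for even n, n-2 for odd n),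
--     # so the answer is the multiplicative order of 2 modulo m: walk powers of 2 only.
--     m = 2 * (n // 2) - 1
--     if m < 2:
--         return 1
--     ops, p = 1, 2
--     while p != 1:
--         p = 2 * p % m
--         ops += 1
--     return ops
-- ===== Notes on version B (the rewrite author's own statement) =====
-- stated objective: faster
-- what changed: Instead of building an O(n) dict of the whole inverse permutation and walking it, B walks only the cycle of position 1 as successive powers of 2 modulo m = 2*(n//2)-1, computing the multiplicative order of 2 mod m with O(1) memory and no dict.
import Mathlib
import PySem

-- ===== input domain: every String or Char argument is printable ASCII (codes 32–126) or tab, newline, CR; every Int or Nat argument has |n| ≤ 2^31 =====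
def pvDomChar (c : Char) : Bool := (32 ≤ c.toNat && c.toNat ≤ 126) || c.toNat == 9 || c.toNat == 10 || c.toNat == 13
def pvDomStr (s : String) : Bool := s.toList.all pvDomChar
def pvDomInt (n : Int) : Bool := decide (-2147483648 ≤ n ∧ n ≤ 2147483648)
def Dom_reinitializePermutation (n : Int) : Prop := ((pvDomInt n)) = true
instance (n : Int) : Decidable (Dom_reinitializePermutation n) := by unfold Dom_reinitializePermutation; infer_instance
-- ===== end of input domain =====

-- B replaces A's O(n) dict of the whole inverse permutation by walking only the cycle of
-- position 1 as powers of 2 modulo m = 2*(n//2)-1 (the multiplicative order of 2 mod m).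

-- ===== PORT A =====
-- value stored by A's dict comprehension at key i
def pvMapVal (n i : Int) : Int :=
  PySem.Int.floordiv i 2 + (if PySem.Int.mod i 2 ≠ 0 then PySem.Int.floordiv n 2 else 0)

-- A's dict comprehension is keyed by exactly the ints 0..n-1, so it is ported as an array
-- whose entry k is mapping[k]: exact for every key in range(n), with O(1) lookup like a dict.
def pvBuildMap (n : Int) : Array Int :=
  (Array.range n.toNat).map (fun k => pvMapVal n (Int.ofNat k))

-- mapping[i]; out of 0..n-1 Python raises KeyError (n ≤ 1 is excluded by Pre_, and inside the
-- loop the key is proved in range), so the default is never returned where Python returns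
def pvLookup (a : Array Int) (i : Int) : Int := a.getD i.toNat 0

-- A's while loop; fuel only makes it total (never exhausted under Pre_, proof does not need that)
def pvLoopA (d : Array Int) : Nat → Int → Int → Int
  | 0, _, ops => ops
  | f + 1, i, ops => if i = 1 then ops else pvLoopA d f (pvLookup d i) (ops + 1)

def reinitializePermutation (n : Int) : Int :=
  pvLoopA (pvBuildMap n) n.toNat (pvLookup (pvBuildMap n) 1) 1

-- ===== PORT B =====
-- B's while loop: p runs through the powers of 2 modulo m; same fuel-for-totality device
def pvLoopB (m : Int) : Nat → Int → Int → Int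
  | 0, _, ops => ops
  | f + 1, p, ops => if p = 1 then ops else pvLoopB m f (PySem.Int.mod (2 * p) m) (ops + 1)

def reinitializePermutation_alt (n : Int) : Int :=
  if 2 * PySem.Int.floordiv n 2 - 1 < 2 then 1
  else pvLoopB (2 * PySem.Int.floordiv n 2 - 1) n.toNat 2 1

-- ===== PRECONDITION & SPEC =====
-- Pre_ excludes n ≤ 1, where A raises KeyError (mapping[1] does not exist).
def Pre_reinitializePermutation (n : Int) : Prop := 2 ≤ n
instance (n : Int) : Decidable (Pre_reinitializePermutation n) := by unfold Pre_reinitializePermutation; infer_instance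
def pvWitness_reinitializePermutation : Int := 6

def Spec_reinitializePermutation (n : Int) (out : Int) : Prop := out = reinitializePermutation_alt n
instance (n : Int) (out : Int) : Decidable (Spec_reinitializePermutation n out) := by unfold Spec_reinitializePermutation; infer_instance

-- ===== CLAIM (what is proved, stated in full; the proofs are below) =====
def Claim_equal_reinitializePermutation : Prop := ∀ (n : Int), Dom_reinitializePermutation n → Pre_reinitializePermutation n → Spec_reinitializePermutation n (reinitializePermutation n)

-- ===== LEMMAS AND PROOFS =====

-- A's dict lookup is the comprehension's formula, for every key 0 ≤ i < n
lemma pvBuildMap_getD (n i : Int) (h0 : 0 ≤ i) (h1 : i < n) :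
    pvLookup (pvBuildMap n) i = pvMapVal n i := by
  have hlt : i.toNat < n.toNat := by omega
  simp [pvLookup, pvBuildMap, Array.getD, hlt, Int.toNat_of_nonneg h0]

-- mapping[1] = n // 2
lemma pvMapVal_one (n : Int) (_hn : 2 ≤ n) : pvMapVal n 1 = n / 2 := by
  unfold pvMapVal
  norm_num [PySem.Int.floordiv_eq_ediv_of_pos (show (0:Int) < 2 by omega),
            PySem.Int.mod_eq_emod_of_pos (show (0:Int) < 2 by omega)]

-- one step of A's walk: pvMapVal halves modulo m = 2*(n/2)-1 and stays in [1, m-1]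
lemma pvStep (n i : Int) (hn : 4 ≤ n) (h1 : 1 ≤ i) (h2 : i ≤ 2 * (n / 2) - 2) :
    (1 ≤ pvMapVal n i ∧ pvMapVal n i ≤ 2 * (n / 2) - 2) ∧
    (2 * pvMapVal n i = i ∨ 2 * pvMapVal n i = i + (2 * (n / 2) - 1)) := by
  unfold pvMapVal
  rw [PySem.Int.floordiv_eq_ediv_of_pos (by omega : (0:Int) < 2),
      PySem.Int.mod_eq_emod_of_pos (by omega : (0:Int) < 2),
      PySem.Int.floordiv_eq_ediv_of_pos (by omega : (0:Int) < 2)]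
  split_ifs with h <;> omega

-- the two loops agree whenever the states are modular inverses: i * p ≡ 1 (mod m)
lemma pvLoop_eq (n : Int) (hn : 4 ≤ n) :
    ∀ (f : Nat) (i p ops : Int), 1 ≤ i → i ≤ 2 * (n / 2) - 2 → 1 ≤ p → p ≤ 2 * (n / 2) - 2 →
      (i * p) % (2 * (n / 2) - 1) = 1 →
      pvLoopA (pvBuildMap n) f i ops = pvLoopB (2 * (n / 2) - 1) f p ops := by
  intro f
  induction f with
  | zero => intro i p ops _ _ _ _ _; rfl
  | succ f ih =>
    intro i p ops hi1 hi2 hp1 hp2 hinv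
    have hiff : i = 1 ↔ p = 1 := by
      constructor
      · intro h; subst h
        rw [one_mul, Int.emod_eq_of_lt (by omega) (by omega)] at hinv; omega
      · intro h; subst h
        rw [mul_one, Int.emod_eq_of_lt (by omega) (by omega)] at hinv; omega
    simp only [pvLoopA, pvLoopB]
    by_cases h1 : i = 1
    · rw [if_pos h1, if_pos (hiff.1 h1)]
    · rw [if_neg h1, if_neg (fun hp => h1 (hiff.2 hp))]
      rw [pvBuildMap_getD n i (by omega) (by omega)]
      obtain ⟨⟨hb1, hb2⟩, hstep⟩ := pvStep n i hn hi1 hi2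
      rw [PySem.Int.mod_eq_emod_of_pos (by omega : (0:Int) < 2 * (n / 2) - 1)]
      set i' : Int := pvMapVal n i with hi'
      set p' : Int := (2 * p) % (2 * (n / 2) - 1) with hp'
      have hinv' : (i' * p') % (2 * (n / 2) - 1) = 1 := by
        have h2p : i' * p' % (2 * (n / 2) - 1) = i' * (2 * p) % (2 * (n / 2) - 1) := by
          rw [Int.mul_emod, hp', Int.emod_emod_of_dvd _ dvd_rfl, ← Int.mul_emod]
        rcases hstep with hs | hs
        · have heq : i' * (2 * p) = i * p := by nlinarith [hs]
          rw [h2p, heq, hinv]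
        · have heq : i' * (2 * p) = i * p + (2 * (n / 2) - 1) * p := by nlinarith [hs]
          rw [h2p, heq, Int.add_mul_emod_self_left, hinv]
      have hp'0 : 0 ≤ p' := Int.emod_nonneg _ (by omega)
      have hp'lt : p' < 2 * (n / 2) - 1 := Int.emod_lt_of_pos _ (by omega)
      have hp'1 : 1 ≤ p' := by
        rcases eq_or_lt_of_le hp'0 with h0 | h0
        · exfalso; rw [← h0, mul_zero, Int.zero_emod] at hinv'; omega
        · omega
      exact ih i' p' (ops + 1) hb1 hb2 hp'1 (by omega) hinv'

-- n = 2 and n = 3: mapping[1] = 1, so A's loop body never runs and A returns 1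
lemma pvA_small (n : Int) (h2 : 2 ≤ n) (h3 : n ≤ 3) : reinitializePermutation n = 1 := by
  obtain ⟨f, hf⟩ : ∃ f, n.toNat = f + 1 := ⟨n.toNat - 1, by omega⟩
  unfold reinitializePermutation
  rw [pvBuildMap_getD n 1 (by omega) (by omega), pvMapVal_one n h2,
      (by omega : n / 2 = 1), hf]
  simp [pvLoopA]

-- n = 2 and n = 3: m = 1 < 2, so B returns 1
lemma pvB_small (n : Int) (h2 : 2 ≤ n) (h3 : n ≤ 3) : reinitializePermutation_alt n = 1 := by
  unfold reinitializePermutation_alt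
  rw [PySem.Int.floordiv_eq_ediv_of_pos (by omega : (0:Int) < 2), if_pos (by omega)]

-- ===== VERDICT (by name: the statement is the Claim_ definition above) =====
theorem reinitializePermutation_spec : Claim_equal_reinitializePermutation := by
  intro n _ hpre
  unfold Spec_reinitializePermutation
  unfold Pre_reinitializePermutation at hpre
  by_cases hsmall : n ≤ 3
  · rw [pvA_small n hpre hsmall, pvB_small n hpre hsmall]
  · have hn : 4 ≤ n := by omega
    unfold reinitializePermutation reinitializePermutation_alt
    rw [PySem.Int.floordiv_eq_ediv_of_pos (by omega : (0:Int) < 2),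
        if_neg (by omega : ¬ (2 * (n / 2) - 1 < 2)),
        pvBuildMap_getD n 1 (by omega) (by omega), pvMapVal_one n (by omega)]
    refine pvLoop_eq n hn n.toNat (n / 2) 2 1 (by omega) (by omega) (by omega) (by omega) ?_
    have heq : n / 2 * 2 = 1 + (2 * (n / 2) - 1) * 1 := by ring_nf
    rw [heq, Int.add_mul_emod_self_left]
    exact Int.emod_eq_of_lt (by omega) (by omega)
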